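-- pv_equiv track=rewrite | github.com/Qilun1/Port26 | backend/services/interpolation/sparse.py | extract_active_indices
-- ===== SOURCE A (Python) =====
-- from collections.abc import Sequence
--
-- def extract_active_indices(mask: Sequence[int]) -> list[int]:
--     active_indices: list[int] = []
--     for index, cell_mask in enumerate(mask):
--         if cell_mask not in (0, 1):
--             raise ValueError("mask entries must be 0 or 1.")
--         if cell_mask == 1:
--             active_indices.append(index)
--     return active_indices
-- ===== SOURCE B (Python) =====
-- def extract_active_indices(mask):
--     cells = list(mask)
--     if set(cells) - {0, 1}:
--         raise ValueError("mask entries must be 0 or 1.")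
--     active_indices = []
--     start = 0
--     while True:
--         try:
--             start = cells.index(1, start)
--         except ValueError:
--             return active_indices
--         active_indices.append(start)
--         start += 1
-- ===== Notes on version B (the rewrite author's own statement) =====
-- stated objective: alternative
-- what changed: A walks every element with enumerate, validating and appending as it goes; B validates once via set difference (set(cells) - {0,1}) and then collects positions of ones by repeated cells.index(1, start) searches, jumping from one 1 to the next with no per-element Python loop.
import Mathlib
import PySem

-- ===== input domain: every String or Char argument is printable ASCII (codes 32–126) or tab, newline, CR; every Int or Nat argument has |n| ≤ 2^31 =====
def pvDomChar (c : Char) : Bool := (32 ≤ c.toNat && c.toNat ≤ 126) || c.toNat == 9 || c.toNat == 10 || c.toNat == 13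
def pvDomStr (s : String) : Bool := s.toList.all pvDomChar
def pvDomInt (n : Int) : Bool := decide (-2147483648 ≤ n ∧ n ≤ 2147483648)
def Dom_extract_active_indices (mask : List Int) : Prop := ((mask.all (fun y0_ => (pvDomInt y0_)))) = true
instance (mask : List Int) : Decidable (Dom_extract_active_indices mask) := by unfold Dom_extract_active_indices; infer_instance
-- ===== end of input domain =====

-- B validates once via set difference and then jumps from one 1 to the next with repeated list.index(1, start)
-- searches instead of A's per-element enumerate loop; equivalence on masks of 0/1 entries (A raises otherwise).

-- ===== PORT A =====
-- A's single loop over (index, cell_mask): raise ValueError (none) on an entry not in (0,1), else append index when 1.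
def pvLoopA : List Int → Int → List Int → Option (List Int)
  | [], _, acc => some acc
  | c :: rest, i, acc =>
      if ¬ (c = 0 ∨ c = 1) then none
      else pvLoopA rest (i + 1) (if c = 1 then acc ++ [i] else acc)

def extract_active_indices (mask : List Int) : List Int :=
  (pvLoopA mask 0 []).getD []

-- ===== PORT B =====
-- the while loop: start = cells.index(1, start) (Python: absolute index of the next 1 at or after start,
-- ValueError = none when there is no further 1), append it, continue from start + 1.
def pvCollectB (mask : List Int) (start : Nat) (acc : List Int) : List Int :=
  match h : PySem.List.index? (mask.drop start) (1 : Int) with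
  | none => acc
  | some k => pvCollectB mask (start + k + 1) (acc ++ [((start + k : Nat) : Int)])
termination_by mask.length - start
decreasing_by
  obtain ⟨hk, -, -⟩ := PySem.List.getElem_of_index?_eq_some h
  simp only [List.length_drop] at hk
  omega

-- validation: if set(cells) - {0, 1} is non-empty, raise (none); else run the collection loop.
def extract_active_indices_alt (mask : List Int) : List Int :=
  ((if PySem.Set.diff (PySem.Set.ofList mask) (PySem.Set.ofList [(0 : Int), 1]) ≠ [] then none
    else some (pvCollectB mask 0 [])) : Option (List Int)).getD []

-- ===== PRECONDITION & SPEC =====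
-- Pre_ excludes exactly the masks with an entry outside {0,1}, on which A (and B) raise ValueError.
def Pre_extract_active_indices (mask : List Int) : Prop :=
  mask.all (fun c => c = 0 ∨ c = 1) = true
instance (mask : List Int) : Decidable (Pre_extract_active_indices mask) := by
  unfold Pre_extract_active_indices; infer_instance
def pvWitness_extract_active_indices : List Int := [1, 0, 1, 1]
def Spec_extract_active_indices (mask : List Int) (out : List Int) : Prop := out = extract_active_indices_alt mask
instance (mask : List Int) (out : List Int) : Decidable (Spec_extract_active_indices mask out) := by unfold Spec_extract_active_indices; infer_instance

-- ===== CLAIM (what is proved, stated in full; the proofs are below) =====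
def Claim_equal_extract_active_indices : Prop := ∀ (mask : List Int), Dom_extract_active_indices mask → Pre_extract_active_indices mask → Spec_extract_active_indices mask (extract_active_indices mask)

-- ===== LEMMAS AND PROOFS =====
-- the common characterisation: indices (base s) of the entries equal to 1
def pvOnes (xs : List Int) (s : Int) : List Int :=
  (PySem.List.enumerate xs s).filterMap (fun p => if p.2 = 1 then some p.1 else none)

theorem pv_ones_of_not_mem (xs : List Int) (s : Int) (h : (1 : Int) ∉ xs) : pvOnes xs s = [] := by
  unfold pvOnes
  rw [List.filterMap_eq_nil_iff]
  intro p hp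
  have : p.2 ∈ xs := by
    have := PySem.List.map_snd_enumerate xs s
    exact this ▸ List.mem_map_of_mem hp
  simp only [ite_eq_right_iff]
  intro h1; exact absurd (h1 ▸ this) h

theorem pv_ones_append (xs ys : List Int) (s : Int) :
    pvOnes (xs ++ ys) s = pvOnes xs s ++ pvOnes ys (s + xs.length) := by
  unfold pvOnes
  rw [PySem.List.enumerate_append, List.filterMap_append]

-- A's loop equals acc ++ pvOnes (no validity needed for the shape once all entries pass the check)
theorem pv_loopA_ok (xs : List Int) (s : Int) (acc : List Int)
    (h : ∀ c ∈ xs, c = 0 ∨ c = 1) :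
    pvLoopA xs s acc = some (acc ++ pvOnes xs s) := by
  induction xs generalizing s acc with
  | nil => simp [pvLoopA, pvOnes, PySem.List.enumerate_nil]
  | cons x xs ih =>
    have hx := h x (List.mem_cons_self ..)
    have hxs : ∀ c ∈ xs, c = 0 ∨ c = 1 := fun c hc => h c (List.mem_cons_of_mem _ hc)
    rw [pvLoopA, if_neg (fun hn => by tauto), ih _ _ hxs]
    unfold pvOnes
    rw [PySem.List.enumerate_cons, List.filterMap_cons]
    rcases hx with h0 | h1
    · subst h0; simp
    · subst h1; simp

-- B's loop equals acc ++ pvOnes of the remaining suffix (for ANY mask: it only looks for 1s)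
theorem pv_collectB_ok (mask : List Int) (start : Nat) (acc : List Int) :
    pvCollectB mask start acc = acc ++ pvOnes (mask.drop start) start := by
  induction start, acc using pvCollectB.induct mask with
  | case1 start acc h =>
    rw [pvCollectB.eq_def]
    rw [h]
    rw [pv_ones_of_not_mem _ _ ((PySem.List.index?_eq_none_iff _ _).mp h)]
    simp
  | case2 start acc k h ih =>
    rw [pvCollectB.eq_def]
    rw [h]
    dsimp only
    rw [ih]
    obtain ⟨pre, suf, hsplit, hlen, hnot⟩ := (PySem.List.index?_eq_some_iff _ _ _).mp h
    have hdropk : mask.drop (start + k + 1) = suf := by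
      have : mask.drop (start + k + 1) = (mask.drop start).drop (k + 1) := by
        rw [List.drop_drop]; ring_nf
      rw [this, hsplit]
      have : pre ++ 1 :: suf = (pre ++ [1]) ++ suf := by simp
      rw [this]
      have hl : (pre ++ [(1 : Int)]).length = k + 1 := by simp [hlen]
      rw [← hl, List.drop_left]
    rw [hdropk, hsplit]
    have h1 : pvOnes (pre ++ 1 :: suf) start
        = pvOnes pre start ++ pvOnes (1 :: suf) (start + pre.length) := pv_ones_append ..
    rw [h1, pv_ones_of_not_mem pre _ hnot]
    unfold pvOnes
    rw [PySem.List.enumerate_cons, List.filterMap_cons]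
    simp [hlen, List.append_assoc]

-- under Pre_, the set difference set(mask) - {0,1} is empty
theorem pv_diff_empty (mask : List Int) (h : ∀ c ∈ mask, c = 0 ∨ c = 1) :
    PySem.Set.diff (PySem.Set.ofList mask) (PySem.Set.ofList [(0 : Int), 1]) = [] := by
  unfold PySem.Set.diff
  rw [List.filter_eq_nil_iff]
  intro x hx
  have hm : x ∈ mask := (PySem.Set.mem_ofList _ _).mp hx
  rcases h x hm with h0 | h1 <;> subst_vars <;> decide

-- ===== VERDICT (by name: the statement is the Claim_ definition above) =====
theorem extract_active_indices_spec : Claim_equal_extract_active_indices := by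
  intro mask _ hpre
  have h : ∀ c ∈ mask, c = 0 ∨ c = 1 := by
    simp only [Pre_extract_active_indices, List.all_eq_true] at hpre
    intro c hc; simpa using hpre c hc
  unfold Spec_extract_active_indices extract_active_indices extract_active_indices_alt
  rw [pv_loopA_ok mask 0 [] h, if_neg (by simp [pv_diff_empty mask h]),
      pv_collectB_ok mask 0 []]
  simp
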